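-- pv_equiv track=rewrite | github.com/A-stick-bug/Leetcode | 3801. Minimum Cost to Merge Sorted Lists.py | minMergeCost
-- ===== SOURCE A (Python) =====
-- def minMergeCost(lists: list[list[int]]) -> int:
--     n = len(lists)
--     inf = 1 << 60
--
--     states = 1 << n
--     median = [-1] * states
--     size = [-1] * states
--     for mask in range(1, states):
--         arr = []
--         for i in range(n):
--             if mask & (1 << i):
--                 arr.extend(lists[i])
--         median[mask] = sorted(arr)[(len(arr) - 1) // 2]
--         size[mask] = len(arr)
--
--     dp = [inf] * states
--     for mask in range(1, states):
--         if mask.bit_count() == 1:  # individual is free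
--             dp[mask] = 0
--             continue
--         submask = mask
--         while submask:
--             other = mask ^ submask
--             dp[mask] = min(dp[mask], (dp[other]
--                                       + dp[submask]
--                                       + abs(median[other] - median[submask])
--                                       + size[other]
--                                       + size[submask]))
--             submask = (submask - 1) & mask  # go to next
--
--     return dp[-1]
-- ===== SOURCE B (Python) =====
-- def minMergeCost(lists: list[list[int]]) -> int:
--     n = len(lists)
--     inf = 1 << 60
--
--     stats_memo = {}
--
--     def stats(mask):
--         if mask in stats_memo:
--             return stats_memo[mask]
--         arr = sorted(x for i, l in enumerate(lists) if mask >> i & 1 for x in l)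
--         res = (arr[(len(arr) - 1) // 2], len(arr))
--         stats_memo[mask] = res
--         return res
--
--     memo = {}
--
--     def solve(mask):
--         if mask in memo:
--             return memo[mask]
--         if mask.bit_count() == 1:
--             memo[mask] = 0
--             return 0
--         best = inf
--         sub = (mask - 1) & mask
--         while sub:
--             other = mask ^ sub
--             mo, so = stats(other)
--             ms, ss = stats(sub)
--             best = min(best, solve(other) + solve(sub) + abs(mo - ms) + so + ss)
--             sub = (sub - 1) & mask
--         memo[mask] = best
--         return best
--
--     return solve((1 << n) - 1)
-- ===== Notes on version B (the rewrite author's own statement) =====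
-- stated objective: alternative
-- what changed: A precomputes median/size tables for every mask and fills a dp array bottom-up over all masks; B replaces both by a top-down memoized recursion solve(mask) over the same submask chain, with per-mask statistics computed lazily and cached on first use.
import Mathlib
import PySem

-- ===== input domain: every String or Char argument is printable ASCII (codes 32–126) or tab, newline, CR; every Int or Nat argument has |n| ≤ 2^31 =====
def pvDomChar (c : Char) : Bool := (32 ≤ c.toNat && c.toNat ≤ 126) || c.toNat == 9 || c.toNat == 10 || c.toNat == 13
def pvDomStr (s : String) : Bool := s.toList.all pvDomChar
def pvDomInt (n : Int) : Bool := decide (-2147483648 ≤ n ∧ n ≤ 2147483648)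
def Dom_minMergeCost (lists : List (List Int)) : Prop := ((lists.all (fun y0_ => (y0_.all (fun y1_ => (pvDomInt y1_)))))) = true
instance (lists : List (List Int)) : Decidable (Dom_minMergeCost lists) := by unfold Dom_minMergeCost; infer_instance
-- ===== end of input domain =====

-- B replaces A's bottom-up dp[] array fill (and its full median/size precomputation tables)
-- by a top-down memoized recursion over masks with lazily memoized per-mask statistics;
-- objective: alternative decomposition, same asymptotic cost.

-- bit facts cited by the ports' termination/invariant arguments
lemma pv_xor_le (s m : Nat) (hs : s &&& m = s) : m ^^^ s ≤ m := by
  have key : (m ^^^ s) ||| m = m := by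
    apply Nat.eq_of_testBit_eq; intro i
    have h := congrArg (fun x => x.testBit i) hs
    simp only [Nat.testBit_and, Nat.testBit_or, Nat.testBit_xor] at h ⊢
    cases hm : m.testBit i <;> cases hss : s.testBit i <;> simp_all
  calc m ^^^ s ≤ (m ^^^ s) ||| m := Nat.left_le_or
    _ = m := key

lemma pv_xor_lt (s m : Nat) (hs : s &&& m = s) (h0 : s ≠ 0) : m ^^^ s < m := by
  rcases Nat.lt_or_eq_of_le (pv_xor_le s m hs) with h | h
  · exact h
  · exfalso; apply h0
    have h2 := congrArg (fun x => m ^^^ x) h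
    simpa [← Nat.xor_assoc, Nat.xor_self] using h2

lemma pv_step_inv (mask s : Nat) (hinv : s = 0 ∨ (s &&& mask = s ∧ s < mask)) (h0 : s ≠ 0) :
    (s - 1) &&& mask = 0 ∨ (((s - 1) &&& mask) &&& mask = (s - 1) &&& mask ∧ (s - 1) &&& mask < mask) := by
  rcases hinv with h | ⟨_, hlt⟩
  · exact absurd h h0
  · right
    refine ⟨by rw [Nat.and_assoc, Nat.and_self], ?_⟩
    have h1 : (s - 1) &&& mask ≤ s - 1 := Nat.and_le_left
    omega

lemma pv_start_inv (mask : Nat) :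
    (mask - 1) &&& mask = 0 ∨ (((mask - 1) &&& mask) &&& mask = (mask - 1) &&& mask ∧ (mask - 1) &&& mask < mask) := by
  rcases Nat.eq_zero_or_pos mask with h | h
  · left; simp [h]
  · right
    refine ⟨by rw [Nat.and_assoc, Nat.and_self], ?_⟩
    have h1 : (mask - 1) &&& mask ≤ mask - 1 := Nat.and_le_left
    omega

-- ===== PORT A =====
-- arr = []; for i in range(n): if mask & (1 << i): arr.extend(lists[i])
def pvArrA (lists : List (List Int)) (mask : Nat) : List Int :=
  (List.range lists.length).foldl
    (fun arr i => if mask &&& (1 <<< i) ≠ 0 then arr ++ lists.getD i [] else arr) []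

-- submask = mask; while submask: ... ; submask = (submask - 1) & mask
def pvDpLoopA (median size : List Int) (mask : Nat) : Nat → List Int → List Int
  | s, dp =>
    if h : s = 0 then dp
    else
      let other := mask ^^^ s
      let cand := dp.getD other 0 + dp.getD s 0
        + |median.getD other 0 - median.getD s 0|
        + size.getD other 0 + size.getD s 0
      pvDpLoopA median size mask ((s - 1) &&& mask) (dp.set mask (min (dp.getD mask 0) cand))
  termination_by s => s
  decreasing_by
    have h1 : (s - 1) &&& mask ≤ s - 1 := Nat.and_le_left
    omega

def minMergeCost (lists : List (List Int)) : Int :=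
  let n := lists.length
  let inf : Int := 1 <<< 60
  let states : Nat := 1 <<< n
  let ms := (List.range' 1 (states - 1)).foldl
    (fun (p : List Int × List Int) (mask : Nat) =>
      let arr := pvArrA lists mask
      (p.1.set mask (PySem.List.pyGetD (PySem.List.sorted arr (fun x => x))
          (PySem.Int.floordiv ((arr.length : Int) - 1) 2) 0),
       p.2.set mask (arr.length : Int)))
    (List.replicate states (-1 : Int), List.replicate states (-1 : Int))
  let dp := (List.range' 1 (states - 1)).foldl
    (fun dp (mask : Nat) =>
      if PySem.Int.bitCount (mask : Int) = 1 then dp.set mask 0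
      else pvDpLoopA ms.1 ms.2 mask mask dp)
    (List.replicate states inf)
  PySem.List.pyGetD dp (-1) 0

-- ===== PORT B =====
-- arr of stats(): [x for i, l in enumerate(lists) if mask >> i & 1 for x in l]
def pvArrB (lists : List (List Int)) (mask : Nat) : List Int :=
  (PySem.List.enumerate lists).flatMap
    (fun il => if (mask >>> il.1.toNat) &&& 1 = 1 then il.2 else [])

-- stats(mask) with its memo dict threaded through
def pvStatsB (lists : List (List Int)) (mask : Nat) (sm : PySem.Dict Nat (Int × Int)) :
    (Int × Int) × PySem.Dict Nat (Int × Int) :=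
  match sm.get? mask with
  | some p => (p, sm)
  | none =>
    let arr := PySem.List.sorted (pvArrB lists mask) (fun x => x)
    let res : Int × Int :=
      (PySem.List.pyGetD arr (PySem.Int.floordiv ((arr.length : Int) - 1) 2) 0, (arr.length : Int))
    (res, sm.insert mask res)

-- solve(mask) (memo dict and stats memo threaded); the while loop is pvLoopB, driven by the
-- same submask chain sub = (sub - 1) & mask; the Prop argument only carries the loop invariant
-- needed for termination.
mutual
def pvSolveB (lists : List (List Int)) (mask : Nat)
    (memo : PySem.Dict Nat Int) (sm : PySem.Dict Nat (Int × Int)) :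
    Int × PySem.Dict Nat Int × PySem.Dict Nat (Int × Int) :=
  match memo.get? mask with
  | some v => (v, memo, sm)
  | none =>
    if PySem.Int.bitCount (mask : Int) = 1 then (0, memo.insert mask 0, sm)
    else
      let r := pvLoopB lists mask ((mask - 1) &&& mask) (pv_start_inv mask) ((1 : Int) <<< 60) memo sm
      (r.1, r.2.1.insert mask r.1, r.2.2)
termination_by (mask, mask + 2)
decreasing_by
  apply Prod.Lex.right
  have h1 : (mask - 1) &&& mask ≤ mask := Nat.and_le_right
  omega

def pvLoopB (lists : List (List Int)) (mask : Nat) (s : Nat)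
    (hinv : s = 0 ∨ (s &&& mask = s ∧ s < mask))
    (best : Int) (memo : PySem.Dict Nat Int) (sm : PySem.Dict Nat (Int × Int)) :
    Int × PySem.Dict Nat Int × PySem.Dict Nat (Int × Int) :=
  if h : s = 0 then (best, memo, sm)
  else
    let other := mask ^^^ s
    let po := pvStatsB lists other sm
    let ps := pvStatsB lists s po.2
    let ro := pvSolveB lists other memo ps.2
    let rs := pvSolveB lists s ro.2.1 ro.2.2
    let best' := min best (ro.1 + rs.1 + |po.1.1 - ps.1.1| + po.1.2 + ps.1.2)
    pvLoopB lists mask ((s - 1) &&& mask) (pv_step_inv mask s hinv h) best' rs.2.1 rs.2.2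
termination_by (mask, s + 1)
decreasing_by
  · apply Prod.Lex.left
    rcases hinv with h' | ⟨hs, _⟩
    · exact absurd h' h
    · exact pv_xor_lt s mask hs h
  · apply Prod.Lex.left
    rcases hinv with h' | ⟨_, hlt⟩
    · exact absurd h' h
    · exact hlt
  · apply Prod.Lex.right
    have h1 : (s - 1) &&& mask ≤ s - 1 := Nat.and_le_left
    omega
end

def minMergeCost_alt (lists : List (List Int)) : Int :=
  let n := lists.length
  (pvSolveB lists ((1 <<< n) - 1) PySem.Dict.empty PySem.Dict.empty).1

-- ===== PRECONDITION & SPEC =====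
-- Pre_ excludes exactly the inputs on which the Python A raises: a list containing an empty
-- sublist makes sorted(arr)[-1] hit an empty arr (IndexError) in the median precomputation.
def Pre_minMergeCost (lists : List (List Int)) : Prop := ∀ l ∈ lists, l ≠ []
instance (lists : List (List Int)) : Decidable (Pre_minMergeCost lists) := by
  unfold Pre_minMergeCost; infer_instance

def pvWitness_minMergeCost : List (List Int) := [[1], [2, 3]]

def Spec_minMergeCost (lists : List (List Int)) (out : Int) : Prop := out = minMergeCost_alt lists
instance (lists : List (List Int)) (out : Int) : Decidable (Spec_minMergeCost lists out) := by
  unfold Spec_minMergeCost; infer_instance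

-- ===== CLAIM (what is proved, stated in full; the proofs are below) =====
def Claim_equal_minMergeCost : Prop := ∀ (lists : List (List Int)), Dom_minMergeCost lists → Pre_minMergeCost lists → Spec_minMergeCost lists (minMergeCost lists)

-- ===== LEMMAS AND PROOFS =====

-- spec-side: per-mask statistics and the value both programs compute, written as a pure
-- recursion over masks with the same submask chain.
def pvMed (lists : List (List Int)) (mask : Nat) : Int :=
  PySem.List.pyGetD (PySem.List.sorted (pvArrA lists mask) (fun x => x))
    (PySem.Int.floordiv (((pvArrA lists mask).length : Int) - 1) 2) 0

def pvSz (lists : List (List Int)) (mask : Nat) : Int := ((pvArrA lists mask).length : Int)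

mutual
def pvG (lists : List (List Int)) (mask : Nat) : Int :=
  if PySem.Int.bitCount (mask : Int) = 1 then 0
  else pvGLoop lists mask ((mask - 1) &&& mask) (pv_start_inv mask) ((1 : Int) <<< 60)
termination_by (mask, mask + 2)
decreasing_by
  apply Prod.Lex.right
  have h1 : (mask - 1) &&& mask ≤ mask := Nat.and_le_right
  omega

def pvGLoop (lists : List (List Int)) (mask : Nat) (s : Nat)
    (hinv : s = 0 ∨ (s &&& mask = s ∧ s < mask)) (best : Int) : Int :=
  if h : s = 0 then best
  else
    let other := mask ^^^ s
    pvGLoop lists mask ((s - 1) &&& mask) (pv_step_inv mask s hinv h)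
      (min best (pvG lists other + pvG lists s
        + |pvMed lists other - pvMed lists s| + pvSz lists other + pvSz lists s))
termination_by (mask, s + 1)
decreasing_by
  · apply Prod.Lex.left
    rcases hinv with h' | ⟨hs, _⟩
    · exact absurd h' h
    · exact pv_xor_lt s mask hs h
  · apply Prod.Lex.left
    rcases hinv with h' | ⟨_, hlt⟩
    · exact absurd h' h
    · exact hlt
  · apply Prod.Lex.right
    have h1 : (s - 1) &&& mask ≤ s - 1 := Nat.and_le_left
    omega
end

lemma pv_testbit_and (mask i : Nat) : (mask &&& (1 <<< i) ≠ 0) ↔ mask.testBit i = true := by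
  rw [Nat.one_shiftLeft]
  simp [Nat.and_two_pow]

def pvArrC (lists : List (List Int)) (mask : Nat) : List Int :=
  (List.range lists.length).flatMap (fun i => if mask.testBit i then lists.getD i [] else [])

lemma pv_arrA_eq (lists : List (List Int)) (mask : Nat) : pvArrA lists mask = pvArrC lists mask := by
  unfold pvArrA pvArrC
  rw [PySem.List.foldl_congr_mem
    (g := fun arr i => arr ++ (if mask.testBit i then lists.getD i [] else []))]
  · rw [PySem.List.foldl_append_eq_flatMap]; simp
  · intro acc x _
    by_cases h : mask.testBit x
    · rw [if_pos ((pv_testbit_and mask x).mpr h), if_pos h]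
    · rw [if_neg (by simpa [pv_testbit_and] using h), if_neg h]
      simp

lemma pv_enum_flat (lists : List (List Int)) (mask : Nat) : ∀ (k : Nat),
    (PySem.List.enumerate lists (k : Int)).flatMap
      (fun il => if (mask >>> il.1.toNat) &&& 1 = 1 then il.2 else [])
    = (List.range lists.length).flatMap
      (fun i => if mask.testBit (k + i) then lists.getD i [] else []) := by
  induction lists with
  | nil => intro k; simp [PySem.List.enumerate_nil]
  | cons x xs ih =>
    intro k
    rw [PySem.List.enumerate_cons]
    have h1 : ((k : Int) + 1) = (((k + 1 : Nat)) : Int) := by push_cast; ring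
    rw [List.flatMap_cons, h1, ih (k + 1)]
    rw [List.length_cons, List.range_succ_eq_map, List.flatMap_cons, List.flatMap_map]
    congr 1
    · rw [Nat.testBit_eq_decide_div_mod_eq, Nat.shiftRight_eq_div_pow]
      split <;> split <;> simp_all
    · apply List.flatMap_congr
      intro i _
      have h2 : k + 1 + i = k + (i + 1) := by omega
      rw [h2]
      simp [Nat.succ_eq_add_one]

lemma pv_arrB_eq_arrA (lists : List (List Int)) (mask : Nat) :
    pvArrB lists mask = pvArrA lists mask := by
  rw [pv_arrA_eq]
  unfold pvArrB
  simpa using pv_enum_flat lists mask 0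

lemma pv_getD_set (l : List Int) (i j : Nat) (v d : Int) (h : i < l.length) :
    (l.set i v).getD j d = if i = j then v else l.getD j d := by
  simp only [List.getD_eq_getElem?_getD, List.getElem?_set, h, if_true]
  split <;> simp

lemma pv_getD_replicate (n j : Nat) (a d : Int) :
    (List.replicate n a).getD j d = if j < n then a else d := by
  simp only [List.getD_eq_getElem?_getD, List.getElem?_replicate]
  split <;> simp

lemma pv_sz_nonneg (lists : List (List Int)) (mask : Nat) : 0 ≤ pvSz lists mask :=
  Int.natCast_nonneg _

lemma pv_inf_pos : (1 : Int) ≤ (1 : Int) <<< 60 := by decide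

-- A's inner while loop computes the same min-fold as pvGLoop once dp holds pvG below mask
lemma pv_dpLoopA_eq (lists : List (List Int)) (median size dp : List Int) (mask : Nat)
    (hmask : mask < dp.length)
    (hdp : ∀ o, 1 ≤ o → o < mask → dp.getD o 0 = pvG lists o)
    (hms : ∀ o, 1 ≤ o → o < mask → median.getD o 0 = pvMed lists o ∧ size.getD o 0 = pvSz lists o) :
    ∀ s (hinv : s = 0 ∨ (s &&& mask = s ∧ s < mask)) (b : Int),
      pvDpLoopA median size mask s (dp.set mask b) = dp.set mask (pvGLoop lists mask s hinv b) := by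
  intro s
  induction s using Nat.strong_induction_on with
  | _ s ihs =>
    intro hinv b
    by_cases h0 : s = 0
    · subst h0
      rw [pvDpLoopA, pvGLoop]
      simp
    · have hs : s &&& mask = s := by
        rcases hinv with h' | ⟨hs, _⟩
        · exact absurd h' h0
        · exact hs
      have hlt : s < mask := by
        rcases hinv with h' | ⟨_, hlt⟩
        · exact absurd h' h0
        · exact hlt
      have hother : mask ^^^ s < mask := pv_xor_lt s mask hs h0
      have hone : 1 ≤ mask ^^^ s := by
        rcases Nat.eq_zero_or_pos (mask ^^^ s) with hz | hz
        · exfalso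
          rw [Nat.xor_eq_zero_iff] at hz
          omega
        · exact hz
      have r1 : (dp.set mask b).getD (mask ^^^ s) 0 = pvG lists (mask ^^^ s) := by
        rw [pv_getD_set _ _ _ _ _ hmask, if_neg (by omega), hdp _ hone hother]
      have r2 : (dp.set mask b).getD s 0 = pvG lists s := by
        rw [pv_getD_set _ _ _ _ _ hmask, if_neg (by omega), hdp _ (by omega) hlt]
      have r3 : (dp.set mask b).getD mask 0 = b := by
        rw [pv_getD_set _ _ _ _ _ hmask, if_pos rfl]
      have hchain : (s - 1) &&& mask < s := by
        have h1 : (s - 1) &&& mask ≤ s - 1 := Nat.and_le_left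
        omega
      rw [pvDpLoopA, pvGLoop]
      simp only [dif_neg h0]
      rw [r1, r2, r3, (hms _ hone hother).1, (hms _ hone hother).2,
        (hms _ (by omega) hlt).1, (hms _ (by omega) hlt).2, List.set_set]
      exact ihs ((s - 1) &&& mask) hchain _ _

-- the first iteration of A's while loop (submask = mask, other = 0) is a no-op
lemma pv_dpLoopA_start (lists : List (List Int)) (median size dp : List Int) (mask : Nat)
    (hmaskpos : 1 ≤ mask) (hmask : mask < dp.length)
    (hdp0 : dp.getD 0 0 = (1 : Int) <<< 60) (hdpm : dp.getD mask 0 = (1 : Int) <<< 60)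
    (hm0 : median.getD 0 0 = -1) (hs0 : size.getD 0 0 = -1)
    (hsm : size.getD mask 0 = pvSz lists mask)
    (hdp : ∀ o, 1 ≤ o → o < mask → dp.getD o 0 = pvG lists o)
    (hms : ∀ o, 1 ≤ o → o < mask → median.getD o 0 = pvMed lists o ∧ size.getD o 0 = pvSz lists o) :
    pvDpLoopA median size mask mask dp
      = dp.set mask (pvGLoop lists mask ((mask - 1) &&& mask) (pv_start_inv mask) ((1 : Int) <<< 60)) := by
  have h0 : mask ≠ 0 := by omega
  rw [pvDpLoopA]
  simp only [dif_neg h0, Nat.xor_self]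
  rw [hdp0, hdpm, hm0, hs0, hsm]
  have hcand : min ((1 : Int) <<< 60)
      ((1 : Int) <<< 60 + (1 : Int) <<< 60 + |(-1 : Int) - median.getD mask 0| + -1 + pvSz lists mask)
      = (1 : Int) <<< 60 := by
    have ha : (0 : Int) ≤ |(-1 : Int) - median.getD mask 0| := abs_nonneg _
    have hb := pv_sz_nonneg lists mask
    have hc := pv_inf_pos
    omega
  rw [hcand]
  exact pv_dpLoopA_eq lists median size dp mask hmask hdp hms ((mask - 1) &&& mask)
    (pv_start_inv mask) ((1 : Int) <<< 60)

-- A's precomputation loop fills median/size with pvMed/pvSz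
lemma pv_precompute (lists : List (List Int)) (states : Nat) (k : Nat) (hk : k < states) :
    let p := (List.range' 1 k).foldl
      (fun (p : List Int × List Int) (mask : Nat) =>
        let arr := pvArrA lists mask
        (p.1.set mask (PySem.List.pyGetD (PySem.List.sorted arr (fun x => x))
            (PySem.Int.floordiv ((arr.length : Int) - 1) 2) 0),
         p.2.set mask (arr.length : Int)))
      (List.replicate states (-1 : Int), List.replicate states (-1 : Int))
    p.1.length = states ∧ p.2.length = states ∧
      (∀ m, m < states →
        p.1.getD m 0 = (if 1 ≤ m ∧ m ≤ k then pvMed lists m else -1) ∧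
        p.2.getD m 0 = (if 1 ≤ m ∧ m ≤ k then pvSz lists m else -1)) := by
  induction k with
  | zero =>
    refine ⟨by simp, by simp, ?_⟩
    intro m hm
    simp only [List.range'_zero, List.foldl_nil]
    rw [pv_getD_replicate, if_pos hm]
    constructor <;> rw [if_neg (show ¬(1 ≤ m ∧ m ≤ 0) by omega)]
  | succ k ih =>
    obtain ⟨h1, h2, h3⟩ := ih (by omega)
    rw [List.range'_concat, List.foldl_append, List.foldl_cons, List.foldl_nil]
    set pk := List.foldl
      (fun (p : List Int × List Int) (mask : Nat) =>
        let arr := pvArrA lists mask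
        (p.1.set mask (PySem.List.pyGetD (PySem.List.sorted arr (fun x => x))
            (PySem.Int.floordiv ((arr.length : Int) - 1) 2) 0),
         p.2.set mask (arr.length : Int)))
      (List.replicate states (-1 : Int), List.replicate states (-1 : Int))
      (List.range' 1 k) with hpk
    refine ⟨by simpa using h1, by simpa using h2, ?_⟩
    intro m hm
    have hk1 : 1 + 1 * k < pk.1.length := by rw [h1]; omega
    have hk2 : 1 + 1 * k < pk.2.length := by rw [h2]; omega
    rw [pv_getD_set _ _ _ _ _ hk1, pv_getD_set _ _ _ _ _ hk2]
    by_cases hmk : 1 + 1 * k = m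
    · rw [if_pos hmk, if_pos hmk, if_pos (by omega), if_pos (by omega), ← hmk]
      exact ⟨rfl, rfl⟩
    · rw [if_neg hmk, if_neg hmk]
      obtain ⟨g1, g2⟩ := h3 m hm
      rw [g1, g2]
      constructor <;> congr 1 <;> simp only [eq_iff_iff] <;> omega

-- A's dp loop fills dp with pvG
lemma pv_dpfold (lists : List (List Int)) (states : Nat) (median size : List Int)
    (hms : ∀ m, 1 ≤ m → m < states → median.getD m 0 = pvMed lists m ∧ size.getD m 0 = pvSz lists m)
    (hm0 : median.getD 0 0 = -1) (hs0 : size.getD 0 0 = -1)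
    (k : Nat) (hk : k < states) :
    let dp := (List.range' 1 k).foldl
      (fun dp (mask : Nat) =>
        if PySem.Int.bitCount (mask : Int) = 1 then dp.set mask 0
        else pvDpLoopA median size mask mask dp)
      (List.replicate states ((1 : Int) <<< 60))
    dp.length = states ∧
      ∀ m, m < states → dp.getD m 0 = (if 1 ≤ m ∧ m ≤ k then pvG lists m else (1 : Int) <<< 60) := by
  induction k with
  | zero =>
    refine ⟨by simp, ?_⟩
    intro m hm
    simp only [List.range'_zero, List.foldl_nil]
    rw [pv_getD_replicate, if_pos hm, if_neg (by omega)]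

  | succ k ih =>
    obtain ⟨h1, h2⟩ := ih (by omega)
    rw [List.range'_concat, List.foldl_append, List.foldl_cons, List.foldl_nil]
    set dpk := (List.range' 1 k).foldl
      (fun dp (mask : Nat) =>
        if PySem.Int.bitCount (mask : Int) = 1 then dp.set mask 0
        else pvDpLoopA median size mask mask dp)
      (List.replicate states ((1 : Int) <<< 60)) with hdpk
    have hmk : 1 + 1 * k < dpk.length := by omega
    have hset : ∀ v : Int, ∀ m, m < states → (dpk.set (1 + 1 * k) v).getD m 0
        = if 1 + 1 * k = m then v else dpk.getD m 0 := by
      intro v m hm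
      rw [pv_getD_set _ _ _ _ _ hmk]
    by_cases hb : PySem.Int.bitCount ((1 + 1 * k : Nat) : Int) = 1
    · rw [if_pos hb]
      refine ⟨by simpa using h1, ?_⟩
      intro m hm
      rw [hset _ _ hm]
      by_cases hmk2 : 1 + 1 * k = m
      · rw [if_pos hmk2, if_pos (by omega), ← hmk2, pvG, if_pos hb]
      · rw [if_neg hmk2, h2 m hm]
        congr 1
        simp only [eq_iff_iff]
        omega
    · rw [if_neg hb]
      have hstart := pv_dpLoopA_start lists median size dpk (1 + 1 * k)
        (by omega) hmk
        (by rw [h2 0 (by omega), if_neg (by omega)])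
        (by rw [h2 _ (by omega), if_neg (by omega)])
        hm0 hs0
        ((hms _ (by omega) (by omega)).2)
        (fun o ho1 ho2 => by rw [h2 o (by omega), if_pos (by omega)])
        (fun o ho1 ho2 => hms o ho1 (by omega))
      rw [hstart]
      refine ⟨by simpa using h1, ?_⟩
      intro m hm
      rw [hset _ _ hm]
      by_cases hmk2 : 1 + 1 * k = m
      · rw [if_pos hmk2, if_pos (by omega), ← hmk2, pvG, if_neg hb]
      · rw [if_neg hmk2, h2 m hm]
        congr 1
        simp only [eq_iff_iff]
        omega

def pvMemOK (lists : List (List Int)) (memo : PySem.Dict Nat Int) : Prop :=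
  ∀ k v, memo.get? k = some v → v = pvG lists k

def pvSMemOK (lists : List (List Int)) (sm : PySem.Dict Nat (Int × Int)) : Prop :=
  ∀ k p, sm.get? k = some p → p = (pvMed lists k, pvSz lists k)

lemma pv_statsB (lists : List (List Int)) (mask : Nat) (sm : PySem.Dict Nat (Int × Int))
    (hsm : pvSMemOK lists sm) :
    (pvStatsB lists mask sm).1 = (pvMed lists mask, pvSz lists mask) ∧
      pvSMemOK lists (pvStatsB lists mask sm).2 := by
  unfold pvStatsB
  cases h : sm.get? mask with
  | some p =>
    exact ⟨hsm mask p h, hsm⟩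
  | none =>
    dsimp only
    have harr : PySem.List.sorted (pvArrB lists mask) (fun x => x)
        = PySem.List.sorted (pvArrA lists mask) (fun x => x) := by
      rw [pv_arrB_eq_arrA]
    have hlen : (pvArrB lists mask).length = (pvArrA lists mask).length := by
      rw [pv_arrB_eq_arrA]
    have hres : (PySem.List.pyGetD (PySem.List.sorted (pvArrB lists mask) (fun x => x))
          (PySem.Int.floordiv (((pvArrB lists mask).length : Int) - 1) 2) 0,
          ((pvArrB lists mask).length : Int)) = (pvMed lists mask, pvSz lists mask) := by
      rw [harr, hlen]; rfl
    refine ⟨by rw [PySem.List.length_sorted, hres], ?_⟩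
    intro k p hk
    by_cases hkm : k = mask
    · subst hkm
      rw [PySem.Dict.get?_insert_self] at hk
      rw [← Option.some_inj.mp hk, ← hres]
      rw [PySem.List.length_sorted]
    · rw [PySem.Dict.get?_insert_of_ne _ _ hkm] at hk
      exact hsm k p hk

lemma pv_loopB (lists : List (List Int)) (mask : Nat)
    (IH : ∀ m, m < mask → ∀ memo sm, pvMemOK lists memo → pvSMemOK lists sm →
      (pvSolveB lists m memo sm).1 = pvG lists m ∧
      pvMemOK lists (pvSolveB lists m memo sm).2.1 ∧
      pvSMemOK lists (pvSolveB lists m memo sm).2.2) :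
    ∀ s (hinv : s = 0 ∨ (s &&& mask = s ∧ s < mask)) (best : Int) memo sm,
      pvMemOK lists memo → pvSMemOK lists sm →
      (pvLoopB lists mask s hinv best memo sm).1 = pvGLoop lists mask s hinv best ∧
      pvMemOK lists (pvLoopB lists mask s hinv best memo sm).2.1 ∧
      pvSMemOK lists (pvLoopB lists mask s hinv best memo sm).2.2 := by
  intro s
  induction s using Nat.strong_induction_on with
  | _ s ihs =>
    intro hinv best memo sm hm hsm
    by_cases h0 : s = 0
    · subst h0
      rw [pvLoopB, pvGLoop]
      exact ⟨rfl, hm, hsm⟩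
    · have hs : s &&& mask = s := by
        rcases hinv with h' | ⟨hs, _⟩
        · exact absurd h' h0
        · exact hs
      have hlt : s < mask := by
        rcases hinv with h' | ⟨_, hlt⟩
        · exact absurd h' h0
        · exact hlt
      have hother : mask ^^^ s < mask := pv_xor_lt s mask hs h0
      have hpo := pv_statsB lists (mask ^^^ s) sm hsm
      have hps := pv_statsB lists s (pvStatsB lists (mask ^^^ s) sm).2 hpo.2
      have hro := IH (mask ^^^ s) hother memo _ hm hps.2
      have hrs := IH s hlt _ _ hro.2.1 hro.2.2
      have hchain : (s - 1) &&& mask < s := by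
        have h1 : (s - 1) &&& mask ≤ s - 1 := Nat.and_le_left
        omega
      have e1 : (pvStatsB lists (mask ^^^ s) sm).1.1 = pvMed lists (mask ^^^ s) := by rw [hpo.1]
      have e2 : (pvStatsB lists (mask ^^^ s) sm).1.2 = pvSz lists (mask ^^^ s) := by rw [hpo.1]
      have e3 : (pvStatsB lists s (pvStatsB lists (mask ^^^ s) sm).2).1.1 = pvMed lists s := by
        rw [hps.1]
      have e4 : (pvStatsB lists s (pvStatsB lists (mask ^^^ s) sm).2).1.2 = pvSz lists s := by
        rw [hps.1]
      rw [pvLoopB, pvGLoop]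
      simp only [dif_neg h0]
      rw [e1, e2, e3, e4, hro.1, hrs.1]
      exact ihs ((s - 1) &&& mask) hchain _ _ _ _ hrs.2.1 hrs.2.2

lemma pv_solveB (lists : List (List Int)) (mask : Nat) :
    ∀ memo sm, pvMemOK lists memo → pvSMemOK lists sm →
      (pvSolveB lists mask memo sm).1 = pvG lists mask ∧
      pvMemOK lists (pvSolveB lists mask memo sm).2.1 ∧
      pvSMemOK lists (pvSolveB lists mask memo sm).2.2 := by
  induction mask using Nat.strong_induction_on with
  | _ mask IH =>
    intro memo sm hm hsm
    rw [pvSolveB]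
    cases h : memo.get? mask with
    | some v =>
      exact ⟨hm mask v h, hm, hsm⟩
    | none =>
      dsimp only
      by_cases hb : PySem.Int.bitCount (mask : Int) = 1
      · rw [if_pos hb]
        refine ⟨by rw [pvG, if_pos hb], ?_, hsm⟩
        intro k v hk
        by_cases hkm : k = mask
        · subst hkm
          rw [PySem.Dict.get?_insert_self] at hk
          rw [← Option.some_inj.mp hk, pvG, if_pos hb]
        · rw [PySem.Dict.get?_insert_of_ne _ _ hkm] at hk
          exact hm k v hk
      · rw [if_neg hb]
        have hloop := pv_loopB lists mask IH ((mask - 1) &&& mask) (pv_start_inv mask)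
          ((1 : Int) <<< 60) memo sm hm hsm
        have hG : pvG lists mask
            = pvGLoop lists mask ((mask - 1) &&& mask) (pv_start_inv mask) ((1 : Int) <<< 60) := by
          rw [pvG, if_neg hb]
        refine ⟨by rw [hloop.1, hG], ?_, hloop.2.2⟩
        intro k v hk
        by_cases hkm : k = mask
        · subst hkm
          rw [PySem.Dict.get?_insert_self] at hk
          rw [← Option.some_inj.mp hk, hloop.1, hG]
        · rw [PySem.Dict.get?_insert_of_ne _ _ hkm] at hk
          exact hloop.2.1 k v hk

def pvMS (lists : List (List Int)) : List Int × List Int :=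
  (List.range' 1 ((1 <<< lists.length) - 1)).foldl
    (fun (p : List Int × List Int) (mask : Nat) =>
      let arr := pvArrA lists mask
      (p.1.set mask (PySem.List.pyGetD (PySem.List.sorted arr (fun x => x))
          (PySem.Int.floordiv ((arr.length : Int) - 1) 2) 0),
       p.2.set mask (arr.length : Int)))
    (List.replicate (1 <<< lists.length) (-1 : Int), List.replicate (1 <<< lists.length) (-1 : Int))

def pvDP (lists : List (List Int)) : List Int :=
  (List.range' 1 ((1 <<< lists.length) - 1)).foldl
    (fun dp (mask : Nat) =>
      if PySem.Int.bitCount (mask : Int) = 1 then dp.set mask 0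
      else pvDpLoopA (pvMS lists).1 (pvMS lists).2 mask mask dp)
    (List.replicate (1 <<< lists.length) ((1 : Int) <<< 60))

lemma pv_G_zero (lists : List (List Int)) : pvG lists 0 = (1 : Int) <<< 60 := by
  rw [pvG, if_neg (by simp), pvGLoop, dif_pos (show (0:Nat) - 1 &&& 0 = 0 by decide)]

lemma pv_A_eq (lists : List (List Int)) :
    minMergeCost lists = pvG lists ((1 <<< lists.length) - 1) := by
  have hpos : 0 < 1 <<< lists.length := by
    rw [Nat.one_shiftLeft]; exact Nat.two_pow_pos lists.length
  have key : minMergeCost lists = PySem.List.pyGetD (pvDP lists) (-1) 0 := rfl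
  have hp := pv_precompute lists (1 <<< lists.length) ((1 <<< lists.length) - 1) (by omega)
  have hmsOK : ∀ m, 1 ≤ m → m < 1 <<< lists.length →
      (pvMS lists).1.getD m 0 = pvMed lists m ∧ (pvMS lists).2.getD m 0 = pvSz lists m := by
    intro m h1 h2
    obtain ⟨g1, g2⟩ := hp.2.2 m h2
    exact ⟨by rw [show (pvMS lists).1.getD m 0 = _ from g1, if_pos (by omega)],
           by rw [show (pvMS lists).2.getD m 0 = _ from g2, if_pos (by omega)]⟩
  have hm0 : (pvMS lists).1.getD 0 0 = -1 := by
    rw [show (pvMS lists).1.getD 0 0 = _ from (hp.2.2 0 (by omega)).1, if_neg (by omega)]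
  have hs0 : (pvMS lists).2.getD 0 0 = -1 := by
    rw [show (pvMS lists).2.getD 0 0 = _ from (hp.2.2 0 (by omega)).2, if_neg (by omega)]
  have hd := pv_dpfold lists (1 <<< lists.length) (pvMS lists).1 (pvMS lists).2
    hmsOK hm0 hs0 ((1 <<< lists.length) - 1) (by omega)
  have hlen : (pvDP lists).length = 1 <<< lists.length := hd.1
  have hfact : ∀ m, m < 1 <<< lists.length → (pvDP lists).getD m 0
      = (if 1 ≤ m ∧ m ≤ (1 <<< lists.length) - 1 then pvG lists m else (1 : Int) <<< 60) :=
    hd.2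
  have hne : pvDP lists ≠ [] := by
    intro h
    rw [h] at hlen
    simp at hlen
    omega
  have hlast : PySem.List.pyGetD (pvDP lists) (-1) 0
      = (pvDP lists).getD ((1 <<< lists.length) - 1) 0 := by
    rw [PySem.List.pyGetD_neg_one _ _ hne, List.getLast_eq_getElem,
      List.getD_eq_getElem?_getD, List.getElem?_eq_getElem (by omega)]
    simp only [Option.getD_some]
    exact getElem_congr rfl (by omega) _
  rw [key, hlast, hfact _ (by omega)]
  by_cases hn : lists.length = 0
  · rw [if_neg (by rw [hn]; simp)]
    rw [hn]
    simp only [Nat.shiftLeft_zero]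
    rw [pv_G_zero]
  · rw [if_pos ?_]
    have h2 : 2 ≤ 1 <<< lists.length := by
      rw [Nat.one_shiftLeft]
      calc 2 = 2 ^ 1 := rfl
        _ ≤ 2 ^ lists.length := Nat.pow_le_pow_right (by omega) (by omega)
    omega

lemma pv_B_eq (lists : List (List Int)) :
    minMergeCost_alt lists = pvG lists ((1 <<< lists.length) - 1) := by
  unfold minMergeCost_alt
  exact (pv_solveB lists _ _ _ (by intro k v hk; simp [PySem.Dict.get?_empty] at hk)
    (by intro k p hk; simp [PySem.Dict.get?_empty] at hk)).1

-- ===== VERDICT (by name: the statement is the Claim_ definition above) =====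
theorem minMergeCost_spec : Claim_equal_minMergeCost := by
  intro lists _ _
  unfold Spec_minMergeCost
  rw [pv_A_eq, pv_B_eq]
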